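-- pv_equiv track=rewrite | github.com/yangruihan/pfn | src/pfn/runtime/core.py | intersperse
-- ===== SOURCE A (Python) =====
-- def intersperse(sep: str, xs: list[str]) -> list[str]:
--     """Intersperse separator between elements."""
--     if not xs:
--         return []
--     result: list[str] = [xs[0]]
--     for x in xs[1:]:
--         result.append(sep)
--         result.append(x)
--     return result
-- ===== SOURCE B (Python) =====
-- def intersperse(sep: str, xs: list[str]) -> list[str]:
--     """Intersperse separator between elements."""
--     result = [sep] * (2 * len(xs) - 1)
--     result[::2] = xs
--     return result
-- ===== Notes on version B (the rewrite author's own statement) =====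
-- stated objective: idiomatic
-- what changed: Replaces the guard-plus-append loop with preallocating [sep]*(2n-1) and filling the even positions via one strided slice assignment result[::2] = xs.
import Mathlib
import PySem

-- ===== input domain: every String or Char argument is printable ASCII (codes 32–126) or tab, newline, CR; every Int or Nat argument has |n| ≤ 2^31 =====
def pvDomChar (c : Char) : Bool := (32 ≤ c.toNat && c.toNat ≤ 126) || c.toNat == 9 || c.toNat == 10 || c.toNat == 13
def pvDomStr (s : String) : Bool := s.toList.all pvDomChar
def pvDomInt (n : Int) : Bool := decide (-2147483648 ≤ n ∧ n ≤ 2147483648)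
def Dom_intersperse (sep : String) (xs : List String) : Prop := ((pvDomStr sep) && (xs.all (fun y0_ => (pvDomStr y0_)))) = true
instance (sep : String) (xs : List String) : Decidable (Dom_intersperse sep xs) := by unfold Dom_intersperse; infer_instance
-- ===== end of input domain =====

-- B replaces A's guard-plus-append loop by preallocating a [sep]-filled list of length 2n-1
-- and overwriting the even positions with xs (Python: result[::2] = xs); idiomatic, same cost.


-- ===== PORT A =====
-- A: early return on empty, then result := [xs[0]] and a loop appending sep and x for each x of xs[1:].
def intersperse (sep : String) (xs : List String) : List String :=
  match xs with
  | [] => []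
  | h :: t => t.foldl (fun result x => result ++ [sep, x]) [h]

-- ===== PORT B =====
-- B-side helper: Python's strided slice assignment `result[::2] = xs` — overwrite every
-- second position of `result` with the elements of `xs` (lengths match by construction).
def assignEvens (result : List String) (xs : List String) : List String :=
  match result, xs with
  | _ :: r2 :: rest, x :: xt => x :: r2 :: assignEvens rest xt
  | _ :: [], x :: _ => [x]
  | result, _ => result

def intersperse_alt (sep : String) (xs : List String) : List String :=
  assignEvens (List.replicate (2 * xs.length - 1) sep) xs

-- ===== PRECONDITION & SPEC =====
def Spec_intersperse (sep : String) (xs : List String) (out : List String) : Prop := out = intersperse_alt sep xs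
instance (sep : String) (xs : List String) (out : List String) : Decidable (Spec_intersperse sep xs out) := by unfold Spec_intersperse; infer_instance

-- ===== CLAIM (what is proved, stated in full; the proofs are below) =====
def Claim_equal_intersperse : Prop := ∀ (sep : String) (xs : List String), Dom_intersperse sep xs → Spec_intersperse sep xs (intersperse sep xs)

-- ===== LEMMAS AND PROOFS =====

theorem assignEvens_replicate (sep : String) :
    ∀ (t : List String) (h : String),
      assignEvens (List.replicate (2 * t.length + 1) sep) (h :: t)
        = h :: t.flatMap (fun x => [sep, x]) := by
  intro t
  induction t with
  | nil => intro h; rfl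
  | cons y ys ih =>
      intro h
      have hlen : 2 * (y :: ys).length + 1 = (2 * ys.length + 1) + 1 + 1 := by
        simp [List.length_cons]; ring
      rw [hlen, List.replicate_succ, List.replicate_succ]
      simp [assignEvens, ih y, List.flatMap_cons]

theorem foldl_append_pair (sep : String) :
    ∀ (t acc : List String),
      t.foldl (fun result x => result ++ [sep, x]) acc
        = acc ++ t.flatMap (fun x => [sep, x]) := by
  intro t
  induction t with
  | nil => simp
  | cons y ys ih => intro acc; simp [List.foldl_cons, ih, List.flatMap_cons]

-- ===== VERDICT (by name: the statement is the Claim_ definition above) =====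
theorem intersperse_spec : Claim_equal_intersperse := by
  intro sep xs _
  unfold Spec_intersperse intersperse intersperse_alt
  cases xs with
  | nil => rfl
  | cons h t =>
      have hlen : 2 * (h :: t).length - 1 = 2 * t.length + 1 := by
        simp [List.length_cons]; omega
      rw [hlen, assignEvens_replicate]
      show List.foldl (fun result x => result ++ [sep, x]) [h] t
            = h :: t.flatMap (fun x => [sep, x])
      rw [foldl_append_pair]; simp
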